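-- pv_equiv track=rewrite | github.com/MythicSorcerer/azox-mc | tools/bad/mcplayer2.py | find_next_free_slot
-- ===== SOURCE A (Python) =====
-- def find_next_free_slot(inv):
--     """
--     Inventory slots:
--       0-8 hotbar
--       9-35 main inventory
--       36-39 armor (boots->helmet)
--       40 offhand
--     We'll find first free in 0..35 (hotbar+main) by default.
--     """
--     occupied = set()
--     for item in inv:
--         try:
--             s = int(item.get("Slot", -1))
--             occupied.add(s)
--         except Exception:
--             continue
--     for s in range(0, 36):
--         if s not in occupied:
--             return s
--     return None
-- ===== SOURCE B (Python) =====
-- def find_next_free_slot(inv):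
--     """
--     Inventory slots:
--       0-8 hotbar
--       9-35 main inventory
--       36-39 armor (boots->helmet)
--       40 offhand
--     We'll find first free in 0..35 (hotbar+main) by default.
--     """
--     slots = []
--     for item in inv:
--         try:
--             slots.append(int(item.get("Slot", -1)))
--         except Exception:
--             continue
--     slots.sort()
--     expected = 0
--     for v in slots:
--         if v > expected:
--             break
--         if v == expected:
--             expected += 1
--     return expected if expected < 36 else None
-- ===== Notes on version B (the rewrite author's own statement) =====
-- stated objective: alternative
-- what changed: B replaces A's occupied-set plus 36-slot probe with sort-then-gap-scan: it sorts the slot numbers and walks the sorted list once tracking the smallest unseen candidate, returning it if below 36.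
import Mathlib
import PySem

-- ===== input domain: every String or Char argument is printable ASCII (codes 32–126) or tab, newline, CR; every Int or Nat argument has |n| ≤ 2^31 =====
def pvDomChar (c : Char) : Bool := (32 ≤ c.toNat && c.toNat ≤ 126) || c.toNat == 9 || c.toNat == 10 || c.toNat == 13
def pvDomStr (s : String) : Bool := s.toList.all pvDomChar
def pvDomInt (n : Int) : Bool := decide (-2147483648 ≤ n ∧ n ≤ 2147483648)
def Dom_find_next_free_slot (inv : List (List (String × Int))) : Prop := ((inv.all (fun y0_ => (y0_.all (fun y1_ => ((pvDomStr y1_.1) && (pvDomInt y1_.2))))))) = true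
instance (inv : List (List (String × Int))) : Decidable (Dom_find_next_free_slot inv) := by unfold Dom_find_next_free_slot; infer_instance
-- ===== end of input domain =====

-- B replaces A's occupied-set + 36-slot probe with sort-then-gap-scan over the slot numbers (alternative algorithm, same behaviour).


-- ===== PORT A =====
-- item.get("Slot", -1): first-match association-list lookup (Python dict.get). int(·) on an int is the identity,
-- so the try/except never fires; the set is built with PySem.Set.add.
def pvSlotOf (item : List (String × Int)) : Int := (PySem.Dict.mk item).getD "Slot" (-1)

-- 'for s in range(0,36): if s not in occupied: return s' / 'return None'
def pvScanA (occupied : PySem.Set Int) : List Int → Option Int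
  | [] => none
  | s :: rest => if PySem.Set.contains occupied s then pvScanA occupied rest else some s

def find_next_free_slot (inv : List (List (String × Int))) : Option Int :=
  let occupied := inv.foldl (fun acc item => PySem.Set.add acc (pvSlotOf item)) PySem.Set.empty
  pvScanA occupied (PySem.List.pyRange 0 36 1)

-- ===== PORT B =====
-- 'for v in slots: if v > expected: break; if v == expected: expected += 1'
def pvMex : Int → List Int → Int
  | e, [] => e
  | e, v :: rest => if e < v then e else if v = e then pvMex (e + 1) rest else pvMex e rest

def find_next_free_slot_alt (inv : List (List (String × Int))) : Option Int :=
  let slots := inv.map (fun item => (PySem.Dict.mk item).getD "Slot" (-1))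
  let e := pvMex 0 (PySem.List.sorted slots (fun x => x) false)
  if e < 36 then some e else none

-- ===== PRECONDITION & SPEC =====
def Spec_find_next_free_slot (inv : List (List (String × Int))) (out : Option Int) : Prop := out = find_next_free_slot_alt inv
instance (inv : List (List (String × Int))) (out : Option Int) : Decidable (Spec_find_next_free_slot inv out) := by unfold Spec_find_next_free_slot; infer_instance

-- ===== CLAIM (what is proved, stated in full; the proofs are below) =====
def Claim_equal_find_next_free_slot : Prop := ∀ (inv : List (List (String × Int))), Dom_find_next_free_slot inv → Spec_find_next_free_slot inv (find_next_free_slot inv)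

-- ===== LEMMAS AND PROOFS =====

-- membership in the occupied set = some item has that slot value
theorem pv_mem_occupied (inv : List (List (String × Int))) (s : Int) :
    (PySem.Set.contains (inv.foldl (fun acc item => PySem.Set.add acc (pvSlotOf item)) PySem.Set.empty) s = true)
      ↔ s ∈ inv.map (fun item => (PySem.Dict.mk item).getD "Slot" (-1)) := by
  rw [PySem.Set.contains_iff]
  rw [show (PySem.Set.empty : PySem.Set Int) = [] from rfl, PySem.Set.mem_foldl_add]
  simp [pvSlotOf, List.mem_map, eq_comm]

-- pvMex over a ≤-sorted list computes the least value ≥ e not in the list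
theorem pvMex_spec (l : List Int) (e : Int) (h : l.Pairwise (· ≤ ·)) :
    e ≤ pvMex e l ∧ pvMex e l ∉ l ∧ ∀ m, e ≤ m → m < pvMex e l → m ∈ l := by
  induction l generalizing e with
  | nil =>
    refine ⟨le_refl _, by simp [pvMex], ?_⟩
    intro m h1 h2
    simp [pvMex] at h2
    omega
  | cons v rest ih =>
    have hrest : rest.Pairwise (· ≤ ·) := h.tail
    have hv : ∀ x ∈ rest, v ≤ x := fun x hx => (List.pairwise_cons.mp h).1 x hx
    by_cases h1 : e < v
    · refine ⟨by simp [pvMex, h1], ?_, ?_⟩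
      · simp [pvMex, h1]
        constructor
        · omega
        · intro hmem; exact absurd (hv _ hmem) (by omega)
      · intro m hm1 hm2; simp [pvMex, h1] at hm2; omega
    · by_cases h2 : v = e
      · obtain ⟨ha, hb, hc⟩ := ih (e + 1) hrest
        refine ⟨by simp [pvMex, h2]; omega, ?_, ?_⟩
        · simp [pvMex, h2]
          exact ⟨by omega, hb⟩
        · intro m hm1 hm2
          simp [pvMex, h2] at hm2
          rcases eq_or_lt_of_le hm1 with heq | hlt
          · simp [h2, ← heq]
          · exact List.mem_cons_of_mem _ (hc m (by omega) hm2)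
      · obtain ⟨ha, hb, hc⟩ := ih e hrest
        refine ⟨by simp [pvMex, h1, h2]; omega, ?_, ?_⟩
        · simp [pvMex, h1, h2]
          exact ⟨by omega, hb⟩
        · intro m hm1 hm2
          simp [pvMex, h1, h2] at hm2
          exact List.mem_cons_of_mem _ (hc m hm1 hm2)

-- A's probe loop, characterised by the least free value m
theorem pv_scan_char : ∀ (n : Nat) (occ : PySem.Set Int) (m a : Int), (36 - a).toNat = n → 0 ≤ a → a ≤ m →
    PySem.Set.contains occ m = false → (∀ x, 0 ≤ x → x < m → PySem.Set.contains occ x = true) →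
    pvScanA occ (PySem.List.pyRange a 36 1) = if m < 36 then some m else none := by
  intro n
  induction n with
  | zero =>
    intro occ m a hn ha ham hno hyes
    rw [PySem.List.pyRange_one_eq_nil (by omega)]
    simp [pvScanA]
    omega
  | succ k ih =>
    intro occ m a hn ha ham hno hyes
    rw [PySem.List.pyRange_one_cons (by omega)]
    by_cases hav : a < m
    · rw [pvScanA, hyes a ha hav, if_pos rfl]
      exact ih occ m (a + 1) (by omega) (by omega) (by omega) hno hyes
    · have : a = m := by omega
      subst this
      rw [pvScanA, hno]
      simp
      omega

-- ===== VERDICT (by name: the statement is the Claim_ definition above) =====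
theorem find_next_free_slot_spec : Claim_equal_find_next_free_slot := by
  intro inv _
  show find_next_free_slot inv = find_next_free_slot_alt inv
  unfold find_next_free_slot find_next_free_slot_alt
  set slots := inv.map (fun item => (PySem.Dict.mk item).getD "Slot" (-1)) with hslots
  set ss := PySem.List.sorted slots (fun x => x) false with hss
  have hpw : ss.Pairwise (· ≤ ·) := PySem.List.sorted_pairwise slots (fun x => x)
  obtain ⟨h0, hnot, hall⟩ := pvMex_spec ss 0 hpw
  have hmemss : ∀ x : Int, x ∈ ss ↔ x ∈ slots := fun x => PySem.List.mem_sorted slots (fun x => x) false x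
  apply pv_scan_char ((36 - (0:Int)).toNat) _ (pvMex 0 ss) 0 rfl (le_refl _) h0
  · rw [← Bool.not_eq_true, pv_mem_occupied]
    intro hmem
    exact hnot ((hmemss _).mpr hmem)
  · intro x hx1 hx2
    rw [pv_mem_occupied]
    exact (hmemss _).mp (hall x hx1 hx2)
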